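-- pv_equiv track=rewrite | github.com/liuxiaotong/ensoul | src/ensoul/context_compactor.py | _find_keep_start
-- ===== SOURCE A (Python) =====
-- from typing import Any
--
-- def _find_keep_start(messages: list[dict[str, Any]], keep_recent: int) -> int:
--     """从消息列表尾部向前扫描，找到 keep_recent 个完整轮次的起点索引。
--
--     一个完整轮次由以下消息组成（按顺序）：
--     1. 一个 role=assistant 的消息（可能含 tool_calls）
--     2. 紧随其后的所有 role=tool 响应消息（OAI 格式，0 到 N 条）
--     3. 可选的后续 role=user 消息
--
--     扫描从尾部向前进行，每遇到一个 assistant 消息就计为一个轮次的起点。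
--     确保不会将 assistant 消息压掉而保留其 tool 响应。
--     """
--     if not messages or keep_recent <= 0:
--         return len(messages)
--
--     rounds_found = 0
--     i = len(messages) - 1
--     candidate_start = len(messages)
--
--     while i >= 0 and rounds_found < keep_recent:
--         msg = messages[i]
--         role = msg.get("role", "")
--
--         if role == "assistant":
--             # 找到一个轮次起点
--             candidate_start = i
--             rounds_found += 1
--         elif role in ("user", "tool"):
--             # user/tool 消息属于当前轮次（或前一个轮次的尾部）
--             # 如果还没找到任何 assistant，这些消息也需要保留
--             if rounds_found == 0:
--                 candidate_start = i
--         i -= 1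
--
--     # 如果没找到足够轮次，保留所有消息（从头开始）
--     if rounds_found < keep_recent:
--         return 0
--
--     return candidate_start
-- ===== SOURCE B (Python) =====
-- def _find_keep_start(messages, keep_recent):
--     if not messages or keep_recent <= 0:
--         return len(messages)
--     idx = [i for i, m in enumerate(messages) if m.get("role", "") == "assistant"]
--     if len(idx) < keep_recent:
--         return 0
--     return idx[-keep_recent]
-- ===== Notes on version B (the rewrite author's own statement) =====
-- stated objective: simpler
-- what changed: Replaces the backward counter scan with dead user/tool candidate updates by a single forward pass collecting assistant indices and a direct positional selection idx[-keep_recent].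
import Mathlib
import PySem

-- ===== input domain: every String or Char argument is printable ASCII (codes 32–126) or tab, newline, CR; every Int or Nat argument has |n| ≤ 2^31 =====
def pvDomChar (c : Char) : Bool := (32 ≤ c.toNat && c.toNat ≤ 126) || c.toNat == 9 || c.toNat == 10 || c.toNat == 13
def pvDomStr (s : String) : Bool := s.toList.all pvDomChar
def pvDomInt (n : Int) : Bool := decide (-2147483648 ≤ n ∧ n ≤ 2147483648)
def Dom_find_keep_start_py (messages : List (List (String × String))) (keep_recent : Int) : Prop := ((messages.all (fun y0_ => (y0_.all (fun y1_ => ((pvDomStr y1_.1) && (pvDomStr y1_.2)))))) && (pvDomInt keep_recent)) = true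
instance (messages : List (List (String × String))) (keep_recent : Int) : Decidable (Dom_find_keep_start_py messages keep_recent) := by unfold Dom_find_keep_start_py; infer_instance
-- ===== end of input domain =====

-- B replaces A's backward counter scan by a forward collection of assistant indices
-- plus the direct selection idx[-keep_recent]; objective: simpler.

-- ===== PORT A =====
-- the while loop of A: walks the reversed list, i is the current Python index,
-- state (rounds_found, candidate_start); loop exits when rounds_found < keep fails
def pvLoopA (rev : List (List (String × String))) (i keep rounds cand : Int) : Int × Int :=
  match rev with
  | [] => (rounds, cand)
  | m :: rest =>
    if rounds < keep then
      let role := (PySem.Dict.mk m).getD "role" ""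
      if role == "assistant" then pvLoopA rest (i - 1) keep (rounds + 1) i
      else if role == "user" || role == "tool" then
        pvLoopA rest (i - 1) keep rounds (if rounds == 0 then i else cand)
      else pvLoopA rest (i - 1) keep rounds cand
    else (rounds, cand)

def find_keep_start_py (messages : List (List (String × String))) (keep_recent : Int) : Int :=
  if messages.isEmpty || keep_recent ≤ 0 then (messages.length : Int)
  else
    let r := pvLoopA messages.reverse ((messages.length : Int) - 1) keep_recent 0 (messages.length : Int)
    if r.1 < keep_recent then 0 else r.2

-- ===== PORT B =====
def find_keep_start_py_alt (messages : List (List (String × String))) (keep_recent : Int) : Int :=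
  if messages.isEmpty || keep_recent ≤ 0 then (messages.length : Int)
  else
    let idx : List Int := (PySem.List.enumerate messages).filterMap
      (fun p => if (PySem.Dict.mk p.2).getD "role" "" == "assistant" then some p.1 else none)
    if (idx.length : Int) < keep_recent then 0
    else (PySem.List.pyGet? idx (-keep_recent)).getD 0  -- in range after the length check, never the default

-- ===== PRECONDITION & SPEC =====
def Spec_find_keep_start_py (messages : List (List (String × String))) (keep_recent : Int) (out : Int) : Prop := out = find_keep_start_py_alt messages keep_recent
instance (messages : List (List (String × String))) (keep_recent : Int) (out : Int) : Decidable (Spec_find_keep_start_py messages keep_recent out) := by unfold Spec_find_keep_start_py; infer_instance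

-- ===== CLAIM (what is proved, stated in full; the proofs are below) =====
def Claim_equal_find_keep_start_py : Prop := ∀ (messages : List (List (String × String))) (keep_recent : Int), Dom_find_keep_start_py messages keep_recent → Spec_find_keep_start_py messages keep_recent (find_keep_start_py messages keep_recent)

-- ===== LEMMAS AND PROOFS =====

def pvIsA (m : List (String × String)) : Bool := (PySem.Dict.mk m).getD "role" "" == "assistant"

-- assistant indices of the list in scanning (descending-index) order
def pvRidx : List (List (String × String)) → Int → List Int
  | [], _ => []
  | m :: rest, i => if pvIsA m then i :: pvRidx rest (i - 1) else pvRidx rest (i - 1)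

-- assistant indices in forward (ascending-index) order
def pvFwd : List (List (String × String)) → Int → List Int
  | [], _ => []
  | m :: rest, i => if pvIsA m then i :: pvFwd rest (i + 1) else pvFwd rest (i + 1)

theorem pvLoopA_exit (rev : List (List (String × String))) (i keep rounds cand : Int)
    (h : ¬ rounds < keep) : pvLoopA rev i keep rounds cand = (rounds, cand) := by
  cases rev with
  | nil => rfl
  | cons m rest => simp [pvLoopA, h]

theorem pvLoopA_asst (m : List (String × String)) (rest : List (List (String × String)))
    (i keep rounds cand : Int) (h1 : rounds < keep) (ha : pvIsA m = true) :
    pvLoopA (m :: rest) i keep rounds cand = pvLoopA rest (i - 1) keep (rounds + 1) i := by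
  have ha' : ((PySem.Dict.mk m).getD "role" "" == "assistant") = true := ha
  simp only [pvLoopA, h1, if_true]
  rw [ha', if_pos rfl]

theorem pvLoopA_notA (m : List (String × String)) (rest : List (List (String × String)))
    (i keep rounds cand : Int) (h1 : rounds < keep) (ha : pvIsA m = false) :
    ∃ c', pvLoopA (m :: rest) i keep rounds cand = pvLoopA rest (i - 1) keep rounds c' := by
  have ha' : ((PySem.Dict.mk m).getD "role" "" == "assistant") = false := ha
  simp only [pvLoopA, h1, if_true]
  rw [ha']
  simp only [Bool.false_eq_true, if_false]
  split
  · exact ⟨_, rfl⟩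
  · exact ⟨cand, rfl⟩

theorem pvLoopA_small (rev : List (List (String × String))) :
    ∀ (i keep rounds cand : Int), rounds < keep →
      rounds + ((pvRidx rev i).length : Int) < keep →
      (pvLoopA rev i keep rounds cand).1 = rounds + ((pvRidx rev i).length : Int) := by
  induction rev with
  | nil => intro i keep rounds cand h1 h2; simp [pvLoopA, pvRidx]
  | cons m rest ih =>
    intro i keep rounds cand h1 h2
    by_cases ha : pvIsA m = true
    · have hridx : pvRidx (m :: rest) i = i :: pvRidx rest (i - 1) := by simp [pvRidx, ha]
      rw [hridx] at h2 ⊢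
      rw [pvLoopA_asst m rest i keep rounds cand h1 ha]
      simp only [List.length_cons] at h2 ⊢
      rw [ih (i - 1) keep (rounds + 1) i (by push_cast at h2 ⊢; omega) (by push_cast at h2 ⊢; omega)]
      push_cast; ring
    · have ha' : pvIsA m = false := by simpa using ha
      have hridx : pvRidx (m :: rest) i = pvRidx rest (i - 1) := by simp [pvRidx, ha']
      rw [hridx] at h2 ⊢
      obtain ⟨c', hc⟩ := pvLoopA_notA m rest i keep rounds cand h1 ha'
      rw [hc]
      exact ih (i - 1) keep rounds c' h1 h2

theorem pvLoopA_big (rev : List (List (String × String))) :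
    ∀ (i keep rounds cand : Int), rounds < keep →
      keep - rounds ≤ ((pvRidx rev i).length : Int) →
      pvLoopA rev i keep rounds cand = (keep, (pvRidx rev i).getD (keep - rounds - 1).toNat 0) := by
  induction rev with
  | nil => intro i keep rounds cand h1 h2; simp [pvRidx] at h2; omega
  | cons m rest ih =>
    intro i keep rounds cand h1 h2
    by_cases ha : pvIsA m = true
    · have hridx : pvRidx (m :: rest) i = i :: pvRidx rest (i - 1) := by simp [pvRidx, ha]
      rw [hridx] at h2 ⊢
      rw [pvLoopA_asst m rest i keep rounds cand h1 ha]
      by_cases hk : rounds + 1 < keep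
      · have h2' : keep - (rounds + 1) ≤ ((pvRidx rest (i - 1)).length : Int) := by
          simp only [List.length_cons] at h2; push_cast at h2 ⊢; omega
        rw [ih (i - 1) keep (rounds + 1) i hk h2']
        have ht : (keep - rounds - 1).toNat = (keep - (rounds + 1) - 1).toNat + 1 := by omega
        rw [ht]
        simp [List.getD]
      · have hkeq : keep = rounds + 1 := by omega
        rw [pvLoopA_exit _ _ _ _ _ hk]
        simp [hkeq, List.getD]
    · have ha' : pvIsA m = false := by simpa using ha
      have hridx : pvRidx (m :: rest) i = pvRidx rest (i - 1) := by simp [pvRidx, ha']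
      rw [hridx] at h2 ⊢
      obtain ⟨c', hc⟩ := pvLoopA_notA m rest i keep rounds cand h1 ha'
      rw [hc]
      exact ih (i - 1) keep rounds c' h1 h2

theorem pvRidx_append (a b : List (List (String × String))) :
    ∀ i : Int, pvRidx (a ++ b) i = pvRidx a i ++ pvRidx b (i - (a.length : Int)) := by
  induction a with
  | nil => intro i; simp [pvRidx]
  | cons m rest ih =>
    intro i
    simp only [List.cons_append, pvRidx, ih (i - 1), List.length_cons]
    have h : i - 1 - (rest.length : Int) = i - ((rest.length : Int) + 1) := by ring
    rw [h]
    push_cast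
    split <;> simp

theorem pvRidx_reverse (l : List (List (String × String))) :
    ∀ i : Int, pvRidx l.reverse (i + (l.length : Int) - 1) = (pvFwd l i).reverse := by
  induction l with
  | nil => intro i; simp [pvRidx, pvFwd]
  | cons m rest ih =>
    intro i
    have hrev : (m :: rest).reverse = rest.reverse ++ [m] := by simp
    rw [hrev, pvRidx_append]
    have h1 : i + (((m :: rest)).length : Int) - 1 = (i + 1) + ((rest).length : Int) - 1 := by
      simp; ring
    rw [h1, ih (i + 1)]
    have h2 : (i + 1) + ((rest).length : Int) - 1 - ((rest.reverse).length : Int) = i := by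
      simp; ring
    rw [h2]
    simp only [pvFwd]
    split <;> rename_i hA <;> simp [pvRidx, hA]

theorem pvFwd_enum (l : List (List (String × String))) :
    ∀ s : Int, (PySem.List.enumerate l s).filterMap
        (fun p => if (PySem.Dict.mk p.2).getD "role" "" == "assistant" then some p.1 else none)
      = pvFwd l s := by
  induction l with
  | nil => intro s; simp [PySem.List.enumerate_nil]; rfl
  | cons m rest ih =>
    intro s
    rw [PySem.List.enumerate_cons]
    by_cases hA : (PySem.Dict.mk m).getD "role" "" = "assistant"
    · simp only [List.filterMap_cons, pvFwd, pvIsA]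
      simp only [hA, beq_self_eq_true, if_true]
      exact congrArg _ (ih (s + 1))
    · simp only [List.filterMap_cons, pvFwd, pvIsA]
      have hb : ((PySem.Dict.mk m).getD "role" "" == "assistant") = false := by
        simpa using hA
      simp only [hb, Bool.false_eq_true, if_false]
      exact ih (s + 1)

-- ===== VERDICT (by name: the statement is the Claim_ definition above) =====
theorem find_keep_start_py_spec : Claim_equal_find_keep_start_py := by
  intro messages keep_recent _
  unfold Spec_find_keep_start_py find_keep_start_py find_keep_start_py_alt
  by_cases hg : (messages.isEmpty || decide (keep_recent ≤ 0)) = true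
  · simp only [hg, if_true]
  · simp only [hg]
    have hkpos : 0 < keep_recent := by
      simp only [Bool.or_eq_true, decide_eq_true_eq] at hg; omega
    rw [pvFwd_enum messages 0]
    have hridx : pvRidx messages.reverse ((messages.length : Int) - 1) = (pvFwd messages 0).reverse := by
      have h := pvRidx_reverse messages 0
      simpa using h
    have hlenridx : (pvRidx messages.reverse ((messages.length : Int) - 1)).length
        = (pvFwd messages 0).length := by rw [hridx]; simp
    by_cases hlen : ((pvFwd messages 0).length : Int) < keep_recent
    · -- not enough assistants: A's loop finds fewer than keep_recent rounds, both return 0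
      have hs := pvLoopA_small messages.reverse ((messages.length : Int) - 1) keep_recent 0
        (messages.length : Int) hkpos (by omega)
      have h1 : (pvLoopA messages.reverse ((messages.length : Int) - 1) keep_recent 0
          (messages.length : Int)).1 < keep_recent := by omega
      rw [if_pos h1, if_pos hlen]
    · -- enough assistants: A's loop ends at the keep_recent-th assistant from the end
      have hbig := pvLoopA_big messages.reverse ((messages.length : Int) - 1) keep_recent 0
        (messages.length : Int) hkpos (by omega)
      rw [hbig, hridx]
      dsimp only
      rw [if_neg (lt_irrefl keep_recent), if_neg hlen]
      -- both sides are idx[idx.length - keep_recent]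
      have hklen : keep_recent.toNat ≤ (pvFwd messages 0).length := by omega
      have hkpos' : 0 < keep_recent.toNat := by omega
      have hcast : -keep_recent = -((keep_recent.toNat : Nat) : Int) := by omega
      rw [hcast, PySem.List.pyGet?_neg_natCast _ keep_recent.toNat hkpos' hklen]
      have hlt : (pvFwd messages 0).length - keep_recent.toNat < (pvFwd messages 0).length := by
        omega
      rw [List.getElem?_eq_getElem hlt]
      simp only [Option.getD_some]
      have hlt2 : (keep_recent - 0 - 1).toNat < (pvFwd messages 0).reverse.length := by
        rw [List.length_reverse]; omega
      rw [List.getD_eq_getElem (pvFwd messages 0).reverse 0 hlt2, List.getElem_reverse]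
      have hidxeq : (pvFwd messages 0).length - 1 - (keep_recent - 0 - 1).toNat
          = (pvFwd messages 0).length - keep_recent.toNat := by omega
      simp only [hidxeq]
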